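-- pv_equiv track=rewrite | github.com/enarjord/passivbot | src/suite_runner.py | _collect_union
-- ===== SOURCE A (Python) =====
-- from typing import Any, Dict, Iterable, List, Optional, Sequence, Tuple
--
-- def _collect_union(values: Iterable[Optional[List[str]]], fallback: List[str]) -> List[str]:
--     union: set[str] = set()
--     for val in values:
--         if not val:
--             continue
--         union.update(val)
--     if not union:
--         union.update(fallback)
--     return sorted(union)
-- ===== SOURCE B (Python) =====
-- def _collect_union(values, fallback):
--     def insert_unique(out, x):
--         lo, hi = 0, len(out)
--         while lo < hi:
--             mid = (lo + hi) // 2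
--             if out[mid] < x:
--                 lo = mid + 1
--             else:
--                 hi = mid
--         if lo == len(out) or out[lo] != x:
--             out.insert(lo, x)
--
--     out = []
--     for val in values:
--         if not val:
--             continue
--         for x in val:
--             insert_unique(out, x)
--     if not out:
--         for x in fallback:
--             insert_unique(out, x)
--     return out
-- ===== Notes on version B (the rewrite author's own statement) =====
-- stated objective: alternative
-- what changed: Replaces set-union followed by a global sort with a single streaming pass that keeps a sorted duplicate-free accumulator and inserts each element at the position found by a hand-written binary search (ordered insertion); no set and no sort call.
import Mathlib
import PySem

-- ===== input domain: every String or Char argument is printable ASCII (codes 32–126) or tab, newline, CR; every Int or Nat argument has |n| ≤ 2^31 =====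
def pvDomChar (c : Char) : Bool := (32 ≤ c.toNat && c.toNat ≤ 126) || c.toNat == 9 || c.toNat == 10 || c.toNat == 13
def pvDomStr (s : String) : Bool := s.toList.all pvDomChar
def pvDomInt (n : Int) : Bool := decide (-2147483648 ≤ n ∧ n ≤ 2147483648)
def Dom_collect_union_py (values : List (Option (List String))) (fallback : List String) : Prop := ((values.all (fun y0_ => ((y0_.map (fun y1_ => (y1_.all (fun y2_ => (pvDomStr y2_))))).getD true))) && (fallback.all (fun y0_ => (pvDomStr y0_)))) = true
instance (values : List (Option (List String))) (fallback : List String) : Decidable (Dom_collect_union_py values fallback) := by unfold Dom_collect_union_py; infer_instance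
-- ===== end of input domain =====

-- B replaces A's set-union-then-sort with a streaming pass that inserts every element
-- at its ordered position in a sorted duplicate-free accumulator (no set, no sort call).

-- ===== PORT A =====
def collect_union_py (values : List (Option (List String))) (fallback : List String) : List String :=
  let union : PySem.Set String :=
    values.foldl (fun u v =>
      match v with
      | none => u
      | some val => if val = [] then u else PySem.Set.update u val) PySem.Set.empty
  let union := if union = [] then PySem.Set.update union fallback else union
  PySem.List.sorted union (fun x => x)

-- ===== PORT B =====
-- insert_unique: binary search (hand-written while loop, rendered as the obvious
-- well-founded recursion on hi - lo), then insert unless the element is already there.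
def pvBisect (out : List String) (x : String) (lo hi : Nat) : Nat :=
  if lo < hi then
    let mid := (lo + hi) / 2
    if out.getD mid "" < x then pvBisect out x (mid + 1) hi else pvBisect out x lo mid
  else lo
termination_by hi - lo
decreasing_by all_goals omega

def pvInsertU (out : List String) (x : String) : List String :=
  let lo := pvBisect out x 0 out.length
  if lo = out.length ∨ out.getD lo "" ≠ x then PySem.List.insert out (lo : Int) x else out

def collect_union_py_alt (values : List (Option (List String))) (fallback : List String) : List String :=
  let out : List String :=
    values.foldl (fun out v =>
      match v with
      | none => out
      | some val => if val = [] then out else val.foldl pvInsertU out) []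
  if out = [] then fallback.foldl pvInsertU [] else out

-- ===== PRECONDITION & SPEC =====
def Spec_collect_union_py (values : List (Option (List String))) (fallback : List String) (out : List String) : Prop := out = collect_union_py_alt values fallback
instance (values : List (Option (List String))) (fallback : List String) (out : List String) : Decidable (Spec_collect_union_py values fallback out) := by unfold Spec_collect_union_py; infer_instance

-- ===== CLAIM (what is proved, stated in full; the proofs are below) =====
def Claim_equal_collect_union_py : Prop := ∀ (values : List (Option (List String))) (fallback : List String), Dom_collect_union_py values fallback → Spec_collect_union_py values fallback (collect_union_py values fallback)

-- ===== LEMMAS AND PROOFS =====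

-- B's flattening (as a proof-only value): the concatenation of the truthy lists
def pvFlat (values : List (Option (List String))) : List String :=
  values.foldl (fun acc v =>
    match v with
    | none => acc
    | some val => if val = [] then acc else acc ++ val) []

-- B's flattening fold shifts its accumulator to the front
theorem pv_flat_shift (vs : List (Option (List String))) (acc : List String) :
    vs.foldl (fun acc v =>
      match v with
      | none => acc
      | some val => if val = [] then acc else acc ++ val) acc
    = acc ++ pvFlat vs := by
  induction vs generalizing acc with
  | nil => simp [pvFlat]
  | cons v vs ih =>
    cases v with
    | none =>
      rw [List.foldl_cons, show pvFlat (none :: vs) = pvFlat vs from rfl]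
      exact ih acc
    | some val =>
      by_cases h : val = []
      · subst h
        rw [List.foldl_cons, show pvFlat (some [] :: vs) = pvFlat vs from rfl]
        exact ih acc
      · simp only [List.foldl_cons, if_neg h]
        rw [ih (acc ++ val)]
        have : pvFlat (some val :: vs) = val ++ pvFlat vs := by
          simp only [pvFlat, List.foldl_cons, if_neg h, List.nil_append]
          exact ih val
        rw [this, List.append_assoc]

-- A's union fold is Set.update of the initial set with the flat list
theorem pv_union_eq_update (vs : List (Option (List String))) (u : PySem.Set String) :
    vs.foldl (fun u v =>
      match v with
      | none => u
      | some val => if val = [] then u else PySem.Set.update u val) u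
    = PySem.Set.update u (pvFlat vs) := by
  induction vs generalizing u with
  | nil => rfl
  | cons v vs ih =>
    cases v with
    | none => simpa [pvFlat] using ih u
    | some val =>
      by_cases h : val = []
      · simpa [h, pvFlat] using ih u
      · simp only [List.foldl_cons, if_neg h]
        rw [ih (PySem.Set.update u val)]
        have : pvFlat (some val :: vs) = val ++ pvFlat vs := by
          simp only [pvFlat, List.foldl_cons, if_neg h, List.nil_append]
          exact pv_flat_shift vs val
        rw [this]
        simp [PySem.Set.update, List.foldl_append]

-- B's fold over values is a single fold of pvInsertU over the flat list
theorem pv_alt_fold_flat (vs : List (Option (List String))) (acc : List String) :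
    vs.foldl (fun out v =>
      match v with
      | none => out
      | some val => if val = [] then out else val.foldl pvInsertU out) acc
    = (pvFlat vs).foldl pvInsertU acc := by
  induction vs generalizing acc with
  | nil => simp [pvFlat]
  | cons v vs ih =>
    cases v with
    | none => simpa [pvFlat] using ih acc
    | some val =>
      by_cases h : val = []
      · simpa [h, pvFlat] using ih acc
      · simp only [List.foldl_cons, if_neg h]
        rw [ih (val.foldl pvInsertU acc)]
        have : pvFlat (some val :: vs) = val ++ pvFlat vs := by
          simp only [pvFlat, List.foldl_cons, if_neg h, List.nil_append]
          exact pv_flat_shift vs val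
        rw [this, List.foldl_append]

-- getD agrees with getElem in range
theorem pv_getD (out : List String) (j : Nat) (h : j < out.length) :
    out.getD j "" = out[j] := List.getD_eq_getElem out "" h

-- the binary search stays inside its bracket
theorem pv_bisect_le (out : List String) (x : String) :
    ∀ n lo hi, hi - lo = n → lo ≤ hi →
    lo ≤ pvBisect out x lo hi ∧ pvBisect out x lo hi ≤ hi := by
  intro n
  induction n using Nat.strong_induction_on with
  | _ n ih =>
    intro lo hi hn hlh
    by_cases h : lo < hi
    · rw [pvBisect, if_pos h]
      set mid := (lo + hi) / 2 with hmid
      by_cases hc : out.getD mid "" < x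
      · rw [if_pos hc]
        have := ih (hi - (mid + 1)) (by omega) (mid + 1) hi rfl (by omega)
        exact ⟨by omega, this.2⟩
      · rw [if_neg hc]
        have := ih (mid - lo) (by omega) lo mid rfl (by omega)
        exact ⟨this.1, by omega⟩
    · rw [pvBisect, if_neg h]
      omega

-- the binary search returns the lower-bound index for x in a ≤-monotone list
theorem pv_bisect_spec (out : List String) (x : String) :
    ∀ n lo hi, hi - lo = n → hi ≤ out.length → lo ≤ hi →
    (∀ i j, i ≤ j → j < out.length → out.getD i "" ≤ out.getD j "") →
    (∀ j, j < lo → out.getD j "" < x) →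
    (∀ j, hi ≤ j → j < out.length → ¬ out.getD j "" < x) →
    pvBisect out x lo hi ≤ out.length ∧
    (∀ j, j < pvBisect out x lo hi → out.getD j "" < x) ∧
    (∀ j, pvBisect out x lo hi ≤ j → j < out.length → ¬ out.getD j "" < x) := by
  intro n
  induction n using Nat.strong_induction_on with
  | _ n ih =>
    intro lo hi hn hhi hlh hmono hlo hhi2
    by_cases h : lo < hi
    · rw [pvBisect, if_pos h]
      set mid := (lo + hi) / 2 with hmid
      by_cases hc : out.getD mid "" < x
      · rw [if_pos hc]
        refine ih (hi - (mid + 1)) (by omega) (mid + 1) hi rfl hhi (by omega) hmono ?_ hhi2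
        intro j hj
        rcases Nat.lt_or_ge j mid with hj2 | hj2
        · exact lt_of_le_of_lt (hmono j mid (le_of_lt hj2) (by omega)) hc
        · have hjm : j = mid := by omega
          exact hjm ▸ hc
      · rw [if_neg hc]
        refine ih (mid - lo) (by omega) lo mid rfl (by omega) (by omega) hmono hlo ?_
        intro j hj hjlen hcon
        exact hc (lt_of_le_of_lt (hmono mid j hj hjlen) hcon)
    · rw [pvBisect, if_neg h]
      have hE : lo = hi := by omega
      exact ⟨by omega, hlo, fun j hj hjl => hhi2 j (by omega) hjl⟩

-- lower-bound facts for the full-range search on a strictly sorted list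
theorem pv_bisect_lb (out : List String) (x : String) (h : out.Pairwise (· < ·)) :
    pvBisect out x 0 out.length ≤ out.length ∧
    (∀ j, j < pvBisect out x 0 out.length → out.getD j "" < x) ∧
    (∀ j, pvBisect out x 0 out.length ≤ j → j < out.length → ¬ out.getD j "" < x) := by
  have hmono : ∀ i j, i ≤ j → j < out.length → out.getD i "" ≤ out.getD j "" := by
    intro i j hij hj
    rcases Nat.lt_or_ge i j with hlt | hge
    · rw [pv_getD out i (lt_trans hlt hj), pv_getD out j hj]
      exact le_of_lt (List.pairwise_iff_getElem.mp h i j (lt_trans hlt hj) hj hlt)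
    · have : i = j := by omega
      subst this
      exact le_refl _
  refine pv_bisect_spec out x _ 0 out.length rfl (le_refl _) (Nat.zero_le _) hmono ?_ ?_
  · intro j hj
    exact absurd hj (Nat.not_lt_zero j)
  · intro j hj hjl
    exact absurd hjl (Nat.not_lt.mpr hj)

-- membership through pvInsertU
theorem pv_mem_insertU (l : List String) (x y : String) :
    y ∈ pvInsertU l x ↔ y = x ∨ y ∈ l := by
  unfold pvInsertU
  simp only
  set lo := pvBisect l x 0 l.length with hlodef
  have hle : lo ≤ l.length := (pv_bisect_le l x _ 0 l.length rfl (Nat.zero_le _)).2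
  by_cases hc : lo = l.length ∨ l.getD lo "" ≠ x
  · rw [if_pos hc, PySem.List.insert_natCast l lo x hle]
    constructor
    · intro hy
      rcases List.mem_append.mp hy with h1 | h1
      · exact Or.inr (List.mem_of_mem_take h1)
      · rcases List.mem_cons.mp h1 with rfl | h1
        · exact Or.inl rfl
        · exact Or.inr (List.mem_of_mem_drop h1)
    · intro hy
      rcases hy with rfl | hy
      · exact List.mem_append.mpr (Or.inr (by simp))
      · conv at hy => rw [← List.take_append_drop lo l]
        rcases List.mem_append.mp hy with h1 | h1
        · exact List.mem_append.mpr (Or.inl h1)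
        · exact List.mem_append.mpr (Or.inr (List.mem_cons_of_mem _ h1))
  · rw [if_neg hc]
    push Not at hc
    obtain ⟨hne, heq⟩ := hc
    have hlt : lo < l.length := lt_of_le_of_ne hle hne
    have hx : x ∈ l := by
      rw [← heq, pv_getD l lo hlt]
      exact List.getElem_mem hlt
    constructor
    · exact Or.inr
    · rintro (rfl | hy)
      exacts [hx, hy]

-- pvInsertU preserves strict sortedness
theorem pv_pairwise_insertU (l : List String) (x : String)
    (h : l.Pairwise (· < ·)) : (pvInsertU l x).Pairwise (· < ·) := by
  unfold pvInsertU
  simp only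
  set lo := pvBisect l x 0 l.length with hlodef
  obtain ⟨hle, hbelow, habove⟩ := pv_bisect_lb l x h
  by_cases hc : lo = l.length ∨ l.getD lo "" ≠ x
  · rw [if_pos hc, PySem.List.insert_natCast l lo x hle]
    have hxgt : ∀ y ∈ l.take lo, y < x := by
      intro y hy
      obtain ⟨j, hj, hjeq⟩ := List.mem_iff_getElem.mp hy
      have hjlo : j < lo := by
        have := List.length_take_le lo l
        have h2 : j < min lo l.length := by simpa using hj
        omega
      have hjlen : j < l.length := by
        have h2 : j < min lo l.length := by simpa using hj
        omega
      rw [List.getElem_take] at hjeq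
      rw [← hjeq, ← pv_getD l j hjlen]
      exact hbelow j hjlo
    have hxlt : ∀ y ∈ l.drop lo, x < y := by
      intro y hy
      obtain ⟨k, hk, hkeq⟩ := List.mem_iff_getElem.mp hy
      have hklen : lo + k < l.length := by
        have h2 : k < l.length - lo := by simpa using hk
        omega
      have hlolt : lo < l.length := by omega
      have hxle : x ≤ l[lo] := by
        have := habove lo (le_refl lo) hlolt
        rw [pv_getD l lo hlolt] at this
        exact le_of_not_gt this
      have hnex : l.getD lo "" ≠ x := by
        rcases hc with hc | hc
        · exact absurd hc (by omega)
        · exact hc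
      have hxlt0 : x < l[lo] := by
        refine lt_of_le_of_ne hxle ?_
        intro hx
        rw [pv_getD l lo hlolt] at hnex
        exact hnex hx.symm
      rw [List.getElem_drop] at hkeq
      subst hkeq
      rcases Nat.eq_zero_or_pos k with rfl | hkpos
      · simpa using hxlt0
      · exact lt_trans hxlt0
          (List.pairwise_iff_getElem.mp h lo (lo + k) hlolt hklen (by omega))
    rw [List.pairwise_append]
    refine ⟨h.sublist (List.take_sublist lo l), ?_, ?_⟩
    · rw [List.pairwise_cons]
      exact ⟨hxlt, h.sublist (List.drop_sublist lo l)⟩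
    · intro a ha b hb
      rcases List.mem_cons.mp hb with rfl | hb
      · exact hxgt a ha
      · exact lt_trans (hxgt a ha) (hxlt b hb)
  · rw [if_neg hc]
    exact h


-- the fold of pvInsertU: membership and strict sortedness
theorem pv_fold_insertU (xs : List String) (acc : List String)
    (hacc : acc.Pairwise (· < ·)) :
    (xs.foldl pvInsertU acc).Pairwise (· < ·) ∧
    (∀ y, y ∈ xs.foldl pvInsertU acc ↔ y ∈ acc ∨ y ∈ xs) := by
  induction xs generalizing acc with
  | nil => exact ⟨hacc, by simp⟩
  | cons x t ih =>
    rcases ih (pvInsertU acc x) (pv_pairwise_insertU acc x hacc) with ⟨hp, hm⟩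
    refine ⟨hp, ?_⟩
    intro y
    rw [List.foldl_cons, hm y, pv_mem_insertU]
    simp only [List.mem_cons]
    tauto

-- the core fact: sorted(set(xs)) equals the insertion fold over xs
theorem pv_main (xs : List String) :
    PySem.List.sorted (PySem.Set.ofList xs) (fun x => x)
    = xs.foldl pvInsertU [] := by
  rcases pv_fold_insertU xs [] (by simp) with ⟨hp, hm⟩
  apply PySem.List.sorted_eq_of_perm_of_pairwise_lt
  · rw [List.perm_ext_iff_of_nodup (hp.imp ne_of_lt) (PySem.Set.nodup_ofList xs)]
    intro y
    rw [hm y, PySem.Set.mem_ofList]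
    simp
  · exact hp

theorem pv_ofList_ne_nil (xs : List String) (h : xs ≠ []) : PySem.Set.ofList xs ≠ [] := by
  rcases xs with _ | ⟨x, t⟩
  · exact absurd rfl h
  · intro hn
    have : x ∈ PySem.Set.ofList (x :: t) := (PySem.Set.mem_ofList _ _).mpr (by simp)
    rw [hn] at this
    exact absurd this (List.not_mem_nil)

theorem pv_fold_ne_nil (xs : List String) (h : xs ≠ []) : xs.foldl pvInsertU [] ≠ [] := by
  rcases xs with _ | ⟨x, t⟩
  · exact absurd rfl h
  · intro hn
    rcases pv_fold_insertU (x :: t) [] (by simp) with ⟨_, hm⟩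
    have : x ∈ (x :: t).foldl pvInsertU [] := (hm x).mpr (Or.inr (by simp))
    rw [hn] at this
    exact absurd this (List.not_mem_nil)

-- ===== VERDICT (by name: the statement is the Claim_ definition above) =====
theorem collect_union_py_spec : Claim_equal_collect_union_py := by
  intro values fallback _
  unfold Spec_collect_union_py collect_union_py collect_union_py_alt
  simp only
  rw [pv_union_eq_update values PySem.Set.empty, pv_alt_fold_flat values []]
  have hof : PySem.Set.update PySem.Set.empty (pvFlat values) = PySem.Set.ofList (pvFlat values) := rfl
  rw [hof]
  by_cases h : pvFlat values = []
  · rw [h]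
    simp only [List.foldl_nil]
    rw [show PySem.Set.ofList ([] : List String) = [] from rfl]
    simpa using pv_main fallback
  · rw [if_neg (pv_ofList_ne_nil _ h), if_neg (pv_fold_ne_nil _ h)]
    exact pv_main (pvFlat values)
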